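-- pv_equiv track=rewrite | github.com/Team-JUST/Virex | python_engine/core/image_loader/e01_parser.py | _subtract_reserved
-- ===== SOURCE A (Python) =====
-- def _subtract_reserved(gaps, reserved_ranges):
--     def subtract(seg, cut):
--         s, l = seg
--         e = s + l
--         cs, ce = cut
--         # 겹침 없으면 그대로
--         if ce <= s or e <= cs:
--             return [seg]
--         out = []
--         if s < cs:
--             out.append((s, max(0, cs - s)))
--         if ce < e:
--             out.append((ce, max(0, e - ce)))
--         return [(ss, ll) for (ss, ll) in out if ll > 0]
--
--     out = []
--     for g in gaps:
--         frags = [g]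
--         for r in reserved_ranges:
--             nxt = []
--             for f in frags:
--                 nxt.extend(subtract(f, r))
--             frags = nxt
--         out.extend(frags)
--     return out
-- ===== SOURCE B (Python) =====
-- def _subtract_reserved(gaps, reserved_ranges):
--     n = len(reserved_ranges)
--     out = []
--     for (gs, gl) in gaps:
--         # depth-first carve: (start, length, next reserved index) on an explicit stack
--         stack = [(gs, gl, 0)]
--         while stack:
--             s, l, i = stack.pop()
--             if i >= n:
--                 out.append((s, l))
--                 continue
--             cs, ce = reserved_ranges[i]
--             e = s + l
--             if ce <= s or e <= cs:
--                 stack.append((s, l, i + 1))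
--             else:
--                 if ce < e:
--                     stack.append((ce, e - ce, i + 1))
--                 if s < cs:
--                     stack.append((s, cs - s, i + 1))
--     return out
-- ===== Notes on version B (the rewrite author's own statement) =====
-- stated objective: alternative
-- what changed: Per-gap iterative depth-first carving with an explicit (start,length,range-index) stack emitting finished fragments directly, instead of A's breadth-first rebuild of the whole fragment list once per reserved range with a helper returning filtered piece lists.
import Mathlib
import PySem

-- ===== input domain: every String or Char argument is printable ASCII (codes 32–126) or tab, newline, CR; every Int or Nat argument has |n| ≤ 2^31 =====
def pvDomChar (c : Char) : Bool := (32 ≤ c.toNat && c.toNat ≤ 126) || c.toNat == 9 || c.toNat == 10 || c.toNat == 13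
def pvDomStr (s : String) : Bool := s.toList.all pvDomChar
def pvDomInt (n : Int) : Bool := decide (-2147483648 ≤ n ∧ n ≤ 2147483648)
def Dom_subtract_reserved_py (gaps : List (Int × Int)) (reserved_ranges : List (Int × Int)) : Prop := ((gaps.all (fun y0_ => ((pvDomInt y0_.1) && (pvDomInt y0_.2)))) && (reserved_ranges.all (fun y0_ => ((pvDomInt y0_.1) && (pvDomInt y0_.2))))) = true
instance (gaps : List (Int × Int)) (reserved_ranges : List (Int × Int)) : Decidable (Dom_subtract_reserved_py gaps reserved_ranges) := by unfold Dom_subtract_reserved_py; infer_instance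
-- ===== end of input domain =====

-- B replaces A's breadth-first rebuild of the fragment list once per reserved range by a per-gap
-- explicit-stack depth-first carve (objective: alternative, same asymptotic cost).

-- ===== PORT A =====
-- inner helper `subtract(seg, cut)` of A, transliterated
def pvSubtractA (seg : Int × Int) (cut : Int × Int) : List (Int × Int) :=
  let s := seg.1
  let l := seg.2
  let e := s + l
  let cs := cut.1
  let ce := cut.2
  if ce ≤ s ∨ e ≤ cs then [seg]
  else
    let out := (if s < cs then [(s, max 0 (cs - s))] else [])
              ++ (if ce < e then [(ce, max 0 (e - ce))] else [])
    out.filter (fun p => decide (0 < p.2))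


def subtract_reserved_py (gaps : List (Int × Int)) (reserved_ranges : List (Int × Int)) : List (Int × Int) :=
  gaps.foldl (fun out g =>
    out ++ reserved_ranges.foldl
      (fun frags r => frags.foldl (fun nxt f => nxt ++ pvSubtractA f r) [])
      [g]) []

-- ===== PORT B =====
-- the `while stack:` loop of Source B; list head = top of the Python stack (its last element).
-- `fuel` is only a totality guard: each iteration strictly decreases the measure pvMeas (see the
-- lemmas below the claim block), which starts at 3 ^ (len + 1), so the 0-fuel arm is never reached.
def pvAltLoop (rr : List (Int × Int)) : Nat → List (Int × Int × Nat) → List (Int × Int) → List (Int × Int)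
  | 0, _, out => out
  | _ + 1, [], out => out
  | fuel + 1, (s, l, i) :: rest, out =>
    if h : i < rr.length then
      let cs := (rr.get ⟨i, h⟩).1
      let ce := (rr.get ⟨i, h⟩).2
      let e := s + l
      if ce ≤ s ∨ e ≤ cs then pvAltLoop rr fuel ((s, l, i + 1) :: rest) out
      else
        pvAltLoop rr fuel ((if s < cs then [(s, cs - s, i + 1)] else [])
                      ++ (if ce < e then [(ce, e - ce, i + 1)] else []) ++ rest) out
    else pvAltLoop rr fuel rest (out ++ [(s, l)])


def subtract_reserved_py_alt (gaps : List (Int × Int)) (reserved_ranges : List (Int × Int)) : List (Int × Int) :=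
  gaps.foldl (fun out g =>
    pvAltLoop reserved_ranges (3 ^ (reserved_ranges.length + 1)) [(g.1, g.2, 0)] out) []

-- ===== PRECONDITION & SPEC =====
def Spec_subtract_reserved_py (gaps : List (Int × Int)) (reserved_ranges : List (Int × Int)) (out : List (Int × Int)) : Prop := out = subtract_reserved_py_alt gaps reserved_ranges
instance (gaps : List (Int × Int)) (reserved_ranges : List (Int × Int)) (out : List (Int × Int)) : Decidable (Spec_subtract_reserved_py gaps reserved_ranges out) := by unfold Spec_subtract_reserved_py; infer_instance

-- ===== CLAIM (what is proved, stated in full; the proofs are below) =====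
def Claim_equal_subtract_reserved_py : Prop := ∀ (gaps : List (Int × Int)) (reserved_ranges : List (Int × Int)), Dom_subtract_reserved_py gaps reserved_ranges → Spec_subtract_reserved_py gaps reserved_ranges (subtract_reserved_py gaps reserved_ranges)

-- ===== LEMMAS AND PROOFS =====

-- proof-side "carve this fragment by the remaining reserved ranges", the common denominator of both ports
def pvCarve : Int × Int → List (Int × Int) → List (Int × Int)
  | seg, [] => [seg]
  | seg, r :: rs => (pvSubtractA seg r).flatMap (fun p => pvCarve p rs)


def pvMeas (n : Nat) (stack : List (Int × Int × Nat)) : Nat :=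
  (stack.map (fun t => 3 ^ (n + 1 - t.2.2))).sum

lemma pvMeasA (n : Nat) (s l : Int) (i : Nat) (rest : List (Int × Int × Nat)) (h : i < n) :
    pvMeas n ((s, l, i + 1) :: rest) < pvMeas n ((s, l, i) :: rest) := by
  simp only [pvMeas, List.map_cons, List.sum_cons]
  have h3 : 3 ^ (n + 1 - (i + 1)) * 3 = 3 ^ (n + 1 - i) := by
    rw [← pow_succ]; congr 1; omega
  have hp : 0 < 3 ^ (n + 1 - (i + 1)) := Nat.pow_pos (by omega)
  omega

lemma pvMeasB (n : Nat) (s l cs ce : Int) (i : Nat) (rest : List (Int × Int × Nat)) (h : i < n) :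
    pvMeas n ((if s < cs then [(s, cs - s, i + 1)] else [])
        ++ (if ce < s + l then [(ce, s + l - ce, i + 1)] else []) ++ rest)
      < pvMeas n ((s, l, i) :: rest) := by
  simp only [pvMeas, List.map_cons, List.map_append, List.sum_cons, List.sum_append]
  have h3 : 3 ^ (n + 1 - (i + 1)) * 3 = 3 ^ (n + 1 - i) := by
    rw [← pow_succ]; congr 1; omega
  have hp : 0 < 3 ^ (n + 1 - (i + 1)) := Nat.pow_pos (by omega)
  split_ifs <;> simp only [List.map_cons, List.map_nil, List.sum_cons, List.sum_nil] <;> omega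

lemma pvMeasC (n : Nat) (s l : Int) (i : Nat) (rest : List (Int × Int × Nat)) :
    pvMeas n rest < pvMeas n ((s, l, i) :: rest) := by
  simp only [pvMeas, List.map_cons, List.sum_cons]
  have hp : 0 < 3 ^ (n + 1 - i) := Nat.pow_pos (by omega)
  omega

lemma pvSubtractA_overlap (s l cs ce : Int) (h : ¬ (ce ≤ s ∨ s + l ≤ cs)) :
    pvSubtractA (s, l) (cs, ce)
      = (if s < cs then [(s, cs - s)] else []) ++ (if ce < s + l then [(ce, s + l - ce)] else []) := by
  have hB : pvSubtractA (s, l) (cs, ce)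
      = ((if s < cs then [(s, max 0 (cs - s))] else [])
          ++ (if ce < s + l then [(ce, max 0 (s + l - ce))] else [])).filter
          (fun p => decide (0 < p.2)) := by
    simp only [pvSubtractA, h, if_false]
  rw [hB]
  by_cases h1 : s < cs <;> by_cases h2 : ce < s + l
  · have e1 : max (0:ℤ) (cs - s) = cs - s := by omega
    have e2 : max (0:ℤ) (s + l - ce) = s + l - ce := by omega
    simp only [h1, h2, if_true, e1, e2]
    simp [List.filter, h1, h2]
  · have e1 : max (0:ℤ) (cs - s) = cs - s := by omega
    simp only [h1, h2, if_true, if_false, e1, List.append_nil]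
    simp [List.filter, h1]
  · have e2 : max (0:ℤ) (s + l - ce) = s + l - ce := by omega
    simp only [h1, h2, if_true, if_false, e2, List.nil_append]
    simp [List.filter, h2]
  · simp [h1, h2]


lemma pvFoldA_eq_carve (rr : List (Int × Int)) :
    ∀ frags : List (Int × Int),
      rr.foldl (fun frags r => frags.foldl (fun nxt f => nxt ++ pvSubtractA f r) []) frags
        = frags.flatMap (fun f => pvCarve f rr) := by
  induction rr with
  | nil => intro frags; simp [pvCarve]
  | cons r rs ih =>
    intro frags
    simp only [List.foldl_cons]
    have hstep : frags.foldl (fun nxt f => nxt ++ pvSubtractA f r) []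
        = frags.flatMap (fun f => pvSubtractA f r) := by
      have hacc : ∀ acc : List (Int × Int),
          frags.foldl (fun nxt f => nxt ++ pvSubtractA f r) acc
            = acc ++ frags.flatMap (fun f => pvSubtractA f r) := by
        induction frags with
        | nil => intro acc; simp
        | cons f fs ihf => intro acc; simp [ihf, List.append_assoc]
      simpa using hacc []
    rw [hstep, ih, List.flatMap_assoc]
    rfl

lemma pvAltLoop_eq (rr : List (Int × Int)) :
    ∀ (fuel : Nat) (stack : List (Int × Int × Nat)) (out : List (Int × Int)),
      pvMeas rr.length stack ≤ fuel →
      pvAltLoop rr fuel stack out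
        = out ++ stack.flatMap (fun t => pvCarve (t.1, t.2.1) (rr.drop t.2.2)) := by
  intro fuel
  induction fuel with
  | zero =>
    intro stack out hm
    cases stack with
    | nil => simp [pvAltLoop]
    | cons t rest =>
      exfalso
      have hp : 0 < 3 ^ (rr.length + 1 - t.2.2) := Nat.pow_pos (by omega)
      simp only [pvMeas, List.map_cons, List.sum_cons] at hm
      omega
  | succ fuel ih =>
    intro stack out hm
    match stack with
    | [] => simp [pvAltLoop]
    | (s, l, i) :: rest =>
      rw [pvAltLoop]
      by_cases h : i < rr.length
      · rw [dif_pos h]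
        simp only [List.get_eq_getElem]
        have hdrop : rr.drop i = rr[i]'h :: rr.drop (i + 1) := List.drop_eq_getElem_cons h
        by_cases hc : ((rr[i]'h).2 ≤ s ∨ s + l ≤ (rr[i]'h).1)
        · rw [if_pos hc]
          rw [ih _ _ (by have := pvMeasA rr.length s l i rest h; omega)]
          simp only [List.flatMap_cons]
          rw [hdrop]
          have hA : pvSubtractA (s, l) (rr[i]'h) = [(s, l)] := by
            simp only [pvSubtractA]
            rw [if_pos hc]
          simp only [pvCarve, hA]
          simp
        · rw [if_neg hc]
          rw [ih _ _ (by
            have := pvMeasB rr.length s l (rr[i]'h).1 (rr[i]'h).2 i rest h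
            omega)]
          simp only [List.flatMap_cons, List.flatMap_append]
          rw [hdrop]
          have hA : pvSubtractA (s, l) (rr[i]'h)
              = (if s < (rr[i]'h).1 then [(s, (rr[i]'h).1 - s)] else [])
                ++ (if (rr[i]'h).2 < s + l then [((rr[i]'h).2, s + l - (rr[i]'h).2)] else []) :=
            pvSubtractA_overlap s l (rr[i]'h).1 (rr[i]'h).2 hc
          simp only [pvCarve, hA, List.flatMap_append]
          split_ifs <;> simp [List.append_assoc]
      · rw [dif_neg h]
        rw [ih _ _ (by have := pvMeasC rr.length s l i rest; omega)]
        have hdrop : rr.drop i = [] := List.drop_eq_nil_of_le (by omega)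
        simp [hdrop, pvCarve, List.append_assoc]

lemma pv_main (gaps rr : List (Int × Int)) :
    subtract_reserved_py gaps rr = subtract_reserved_py_alt gaps rr := by
  unfold subtract_reserved_py subtract_reserved_py_alt
  induction gaps using List.reverseRecOn with
  | nil => rfl
  | append_singleton gs g ih =>
    simp only [List.foldl_append, List.foldl_cons, List.foldl_nil]
    rw [ih, pvFoldA_eq_carve,
      pvAltLoop_eq rr _ [(g.1, g.2, 0)] _ (by simp [pvMeas])]
    simp

-- ===== VERDICT (by name: the statement is the Claim_ definition above) =====
theorem subtract_reserved_py_spec : Claim_equal_subtract_reserved_py := by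
  intro gaps rr _
  unfold Spec_subtract_reserved_py
  exact pv_main gaps rr
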